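-- pv_equiv track=rewrite | github.com/Asharib706/Arabic-Ebooks | backend.py | convert_english_to_arabic_digits
-- ===== SOURCE A (Python) =====
-- def convert_english_to_arabic_digits(text):
--     # Mapping of English digits to Arabic digits
--     digit_mapping = {
--         '0': '٠',
--         '1': '١',
--         '2': '٢',
--         '3': '٣',
--         '4': '٤',
--         '5': '٥',
--         '6': '٦',
--         '7': '٧',
--         '8': '٨',
--         '9': '٩'
--     }
--
--     # Replace each English digit with its corresponding Arabic digit
--     for eng, arb in digit_mapping.items():
--         text = text.replace(eng, arb)
--
--     return text
-- ===== SOURCE B (Python) =====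
-- def convert_english_to_arabic_digits(text):
--     # Arithmetic on code points: Arabic-Indic digits are a contiguous block at
--     # U+0660, so shift each ASCII digit by a constant offset; no mapping table.
--     out = []
--     for c in text:
--         o = ord(c)
--         if 48 <= o <= 57:
--             out.append(chr(0x0660 + o - 48))
--         else:
--             out.append(c)
--     return ''.join(out)
-- ===== Notes on version B (the rewrite author's own statement) =====
-- stated objective: alternative
-- what changed: Instead of iterating a 10-entry digit map and rescanning the whole string with text.replace for each entry, B makes one pass over the characters with no table at all, shifting each ASCII digit's code point by the constant offset 0x0660-48 (the Arabic-Indic digits are a contiguous Unicode block) and keeping other characters.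
import Mathlib
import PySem

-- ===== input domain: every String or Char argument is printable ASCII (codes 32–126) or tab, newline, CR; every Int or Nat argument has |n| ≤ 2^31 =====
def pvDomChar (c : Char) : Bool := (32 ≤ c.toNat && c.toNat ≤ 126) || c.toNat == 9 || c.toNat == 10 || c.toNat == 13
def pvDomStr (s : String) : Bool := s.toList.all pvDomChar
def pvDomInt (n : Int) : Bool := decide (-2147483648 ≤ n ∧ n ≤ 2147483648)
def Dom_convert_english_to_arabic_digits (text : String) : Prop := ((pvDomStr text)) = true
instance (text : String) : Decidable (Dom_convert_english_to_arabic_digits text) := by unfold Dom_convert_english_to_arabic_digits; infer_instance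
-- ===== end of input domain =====

-- B replaces A's ten full-string `replace` passes (one per map entry) by a single
-- pass over the characters with no mapping table: each ASCII digit's code point is
-- shifted by a constant offset into the contiguous Arabic-Indic digit block (same result).


-- ===== PORT A =====
def convert_english_to_arabic_digits (text : String) : String :=
  let digit_mapping : PySem.Dict String String :=
    ⟨[("0", "٠"), ("1", "١"), ("2", "٢"), ("3", "٣"), ("4", "٤"),
      ("5", "٥"), ("6", "٦"), ("7", "٧"), ("8", "٨"), ("9", "٩")]⟩
  digit_mapping.items.foldl (fun t p => PySem.Str.replace t p.1 p.2) text

-- ===== PORT B =====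
-- Source B: loop over characters appending to `out` (shift digits by 0x0660-48), then ''.join(out)
def convert_english_to_arabic_digits_alt (text : String) : String :=
  let out := text.toList.foldl (fun out c =>
    let o := c.toNat
    out ++ [if 48 ≤ o ∧ o ≤ 57 then Char.ofNat (0x0660 + o - 48) else c]) []
  String.ofList out

-- ===== PRECONDITION & SPEC =====
def Spec_convert_english_to_arabic_digits (text : String) (out : String) : Prop := out = convert_english_to_arabic_digits_alt text
instance (text : String) (out : String) : Decidable (Spec_convert_english_to_arabic_digits text out) := by unfold Spec_convert_english_to_arabic_digits; infer_instance

-- ===== CLAIM (what is proved, stated in full; the proofs are below) =====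
def Claim_equal_convert_english_to_arabic_digits : Prop := ∀ (text : String), Dom_convert_english_to_arabic_digits text → Spec_convert_english_to_arabic_digits text (convert_english_to_arabic_digits text)

-- ===== LEMMAS AND PROOFS =====

-- replacing a single character by a single character is a map over the characters
theorem pvReplaceGo_single (e a : Char) (cs : List Char) (fuel : Nat) (acc : List Char)
    (h : cs.length ≤ fuel) :
    PySem.Chars.replace.go [e] [a] fuel cs acc
      = acc.reverse ++ cs.map (fun c => if c = e then a else c) := by
  induction cs generalizing fuel acc with
  | nil => cases fuel <;> simp [PySem.Chars.replace.go]
  | cons c t ih =>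
    cases fuel with
    | zero => simp at h
    | succ n =>
      simp only [PySem.Chars.replace.go]
      simp only [List.length_cons] at h
      by_cases hc : c = e
      · subst hc
        rw [if_pos (by simp [List.isPrefixOf])]
        rw [show List.drop [c].length (c :: t) = t from rfl]
        rw [ih _ _ (Nat.le_of_succ_le_succ h)]
        simp
      · rw [if_neg (by simp [List.isPrefixOf]; intro hh; exact hc hh.symm)]
        rw [ih _ _ (Nat.le_of_succ_le_succ h)]
        simp [hc]

theorem pvReplace_single (e a : Char) (cs : List Char) :
    PySem.Chars.replace cs [e] [a] = cs.map (fun c => if c = e then a else c) := by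
  simp [PySem.Chars.replace, pvReplaceGo_single e a cs cs.length [] le_rfl]

theorem pvRep (s : String) (e a : Char) :
    PySem.Str.replace s (String.ofList [e]) (String.ofList [a])
      = String.ofList (s.toList.map (fun c => if c = e then a else c)) := by
  simp [PySem.Str.replace, pvReplace_single]

-- the cumulative per-character substitutions after the first i+1 replace passes
def pvS0 (c : Char) : Char := if c = '0' then '٠' else c

def pvS1 (c : Char) : Char := if c = '0' then '٠' else if c = '1' then '١' else c

def pvS2 (c : Char) : Char := if c = '0' then '٠' else if c = '1' then '١' else if c = '2' then '٢' else c

def pvS3 (c : Char) : Char := if c = '0' then '٠' else if c = '1' then '١' else if c = '2' then '٢' else if c = '3' then '٣' else c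

def pvS4 (c : Char) : Char := if c = '0' then '٠' else if c = '1' then '١' else if c = '2' then '٢' else if c = '3' then '٣' else if c = '4' then '٤' else c

def pvS5 (c : Char) : Char := if c = '0' then '٠' else if c = '1' then '١' else if c = '2' then '٢' else if c = '3' then '٣' else if c = '4' then '٤' else if c = '5' then '٥' else c

def pvS6 (c : Char) : Char := if c = '0' then '٠' else if c = '1' then '١' else if c = '2' then '٢' else if c = '3' then '٣' else if c = '4' then '٤' else if c = '5' then '٥' else if c = '6' then '٦' else c

def pvS7 (c : Char) : Char := if c = '0' then '٠' else if c = '1' then '١' else if c = '2' then '٢' else if c = '3' then '٣' else if c = '4' then '٤' else if c = '5' then '٥' else if c = '6' then '٦' else if c = '7' then '٧' else c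

def pvS8 (c : Char) : Char := if c = '0' then '٠' else if c = '1' then '١' else if c = '2' then '٢' else if c = '3' then '٣' else if c = '4' then '٤' else if c = '5' then '٥' else if c = '6' then '٦' else if c = '7' then '٧' else if c = '8' then '٨' else c

def pvS9 (c : Char) : Char := if c = '0' then '٠' else if c = '1' then '١' else if c = '2' then '٢' else if c = '3' then '٣' else if c = '4' then '٤' else if c = '5' then '٥' else if c = '6' then '٦' else if c = '7' then '٧' else if c = '8' then '٨' else if c = '9' then '٩' else c

theorem pvFix0 (c : Char) (h0 : ¬c = '0') : pvS0 c = c := by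
  simp only [pvS0, if_neg h0]

theorem pvFix1 (c : Char) (h0 : ¬c = '0') (h1 : ¬c = '1') : pvS1 c = c := by
  simp only [pvS1, if_neg h0, if_neg h1]

theorem pvFix2 (c : Char) (h0 : ¬c = '0') (h1 : ¬c = '1') (h2 : ¬c = '2') : pvS2 c = c := by
  simp only [pvS2, if_neg h0, if_neg h1, if_neg h2]

theorem pvFix3 (c : Char) (h0 : ¬c = '0') (h1 : ¬c = '1') (h2 : ¬c = '2') (h3 : ¬c = '3') : pvS3 c = c := by
  simp only [pvS3, if_neg h0, if_neg h1, if_neg h2, if_neg h3]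

theorem pvFix4 (c : Char) (h0 : ¬c = '0') (h1 : ¬c = '1') (h2 : ¬c = '2') (h3 : ¬c = '3') (h4 : ¬c = '4') : pvS4 c = c := by
  simp only [pvS4, if_neg h0, if_neg h1, if_neg h2, if_neg h3, if_neg h4]

theorem pvFix5 (c : Char) (h0 : ¬c = '0') (h1 : ¬c = '1') (h2 : ¬c = '2') (h3 : ¬c = '3') (h4 : ¬c = '4') (h5 : ¬c = '5') : pvS5 c = c := by
  simp only [pvS5, if_neg h0, if_neg h1, if_neg h2, if_neg h3, if_neg h4, if_neg h5]

theorem pvFix6 (c : Char) (h0 : ¬c = '0') (h1 : ¬c = '1') (h2 : ¬c = '2') (h3 : ¬c = '3') (h4 : ¬c = '4') (h5 : ¬c = '5') (h6 : ¬c = '6') : pvS6 c = c := by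
  simp only [pvS6, if_neg h0, if_neg h1, if_neg h2, if_neg h3, if_neg h4, if_neg h5, if_neg h6]

theorem pvFix7 (c : Char) (h0 : ¬c = '0') (h1 : ¬c = '1') (h2 : ¬c = '2') (h3 : ¬c = '3') (h4 : ¬c = '4') (h5 : ¬c = '5') (h6 : ¬c = '6') (h7 : ¬c = '7') : pvS7 c = c := by
  simp only [pvS7, if_neg h0, if_neg h1, if_neg h2, if_neg h3, if_neg h4, if_neg h5, if_neg h6, if_neg h7]

theorem pvFix8 (c : Char) (h0 : ¬c = '0') (h1 : ¬c = '1') (h2 : ¬c = '2') (h3 : ¬c = '3') (h4 : ¬c = '4') (h5 : ¬c = '5') (h6 : ¬c = '6') (h7 : ¬c = '7') (h8 : ¬c = '8') : pvS8 c = c := by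
  simp only [pvS8, if_neg h0, if_neg h1, if_neg h2, if_neg h3, if_neg h4, if_neg h5, if_neg h6, if_neg h7, if_neg h8]

theorem pvFix9 (c : Char) (h0 : ¬c = '0') (h1 : ¬c = '1') (h2 : ¬c = '2') (h3 : ¬c = '3') (h4 : ¬c = '4') (h5 : ¬c = '5') (h6 : ¬c = '6') (h7 : ¬c = '7') (h8 : ¬c = '8') (h9 : ¬c = '9') : pvS9 c = c := by
  simp only [pvS9, if_neg h0, if_neg h1, if_neg h2, if_neg h3, if_neg h4, if_neg h5, if_neg h6, if_neg h7, if_neg h8, if_neg h9]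

theorem pvStep1 (c : Char) :
    (if pvS0 c = '1' then '١' else pvS0 c) = pvS1 c := by
  by_cases h0 : c = '0'
  · subst h0; decide
  by_cases h1 : c = '1'
  · subst h1; decide
  rw [pvFix0 c h0, if_neg h1, pvFix1 c h0 h1]

theorem pvStep2 (c : Char) :
    (if pvS1 c = '2' then '٢' else pvS1 c) = pvS2 c := by
  by_cases h0 : c = '0'
  · subst h0; decide
  by_cases h1 : c = '1'
  · subst h1; decide
  by_cases h2 : c = '2'
  · subst h2; decide
  rw [pvFix1 c h0 h1, if_neg h2, pvFix2 c h0 h1 h2]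

theorem pvStep3 (c : Char) :
    (if pvS2 c = '3' then '٣' else pvS2 c) = pvS3 c := by
  by_cases h0 : c = '0'
  · subst h0; decide
  by_cases h1 : c = '1'
  · subst h1; decide
  by_cases h2 : c = '2'
  · subst h2; decide
  by_cases h3 : c = '3'
  · subst h3; decide
  rw [pvFix2 c h0 h1 h2, if_neg h3, pvFix3 c h0 h1 h2 h3]

theorem pvStep4 (c : Char) :
    (if pvS3 c = '4' then '٤' else pvS3 c) = pvS4 c := by
  by_cases h0 : c = '0'
  · subst h0; decide
  by_cases h1 : c = '1'
  · subst h1; decide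
  by_cases h2 : c = '2'
  · subst h2; decide
  by_cases h3 : c = '3'
  · subst h3; decide
  by_cases h4 : c = '4'
  · subst h4; decide
  rw [pvFix3 c h0 h1 h2 h3, if_neg h4, pvFix4 c h0 h1 h2 h3 h4]

theorem pvStep5 (c : Char) :
    (if pvS4 c = '5' then '٥' else pvS4 c) = pvS5 c := by
  by_cases h0 : c = '0'
  · subst h0; decide
  by_cases h1 : c = '1'
  · subst h1; decide
  by_cases h2 : c = '2'
  · subst h2; decide
  by_cases h3 : c = '3'
  · subst h3; decide
  by_cases h4 : c = '4'
  · subst h4; decide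
  by_cases h5 : c = '5'
  · subst h5; decide
  rw [pvFix4 c h0 h1 h2 h3 h4, if_neg h5, pvFix5 c h0 h1 h2 h3 h4 h5]

theorem pvStep6 (c : Char) :
    (if pvS5 c = '6' then '٦' else pvS5 c) = pvS6 c := by
  by_cases h0 : c = '0'
  · subst h0; decide
  by_cases h1 : c = '1'
  · subst h1; decide
  by_cases h2 : c = '2'
  · subst h2; decide
  by_cases h3 : c = '3'
  · subst h3; decide
  by_cases h4 : c = '4'
  · subst h4; decide
  by_cases h5 : c = '5'
  · subst h5; decide
  by_cases h6 : c = '6'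
  · subst h6; decide
  rw [pvFix5 c h0 h1 h2 h3 h4 h5, if_neg h6, pvFix6 c h0 h1 h2 h3 h4 h5 h6]

theorem pvStep7 (c : Char) :
    (if pvS6 c = '7' then '٧' else pvS6 c) = pvS7 c := by
  by_cases h0 : c = '0'
  · subst h0; decide
  by_cases h1 : c = '1'
  · subst h1; decide
  by_cases h2 : c = '2'
  · subst h2; decide
  by_cases h3 : c = '3'
  · subst h3; decide
  by_cases h4 : c = '4'
  · subst h4; decide
  by_cases h5 : c = '5'
  · subst h5; decide
  by_cases h6 : c = '6'
  · subst h6; decide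
  by_cases h7 : c = '7'
  · subst h7; decide
  rw [pvFix6 c h0 h1 h2 h3 h4 h5 h6, if_neg h7, pvFix7 c h0 h1 h2 h3 h4 h5 h6 h7]

theorem pvStep8 (c : Char) :
    (if pvS7 c = '8' then '٨' else pvS7 c) = pvS8 c := by
  by_cases h0 : c = '0'
  · subst h0; decide
  by_cases h1 : c = '1'
  · subst h1; decide
  by_cases h2 : c = '2'
  · subst h2; decide
  by_cases h3 : c = '3'
  · subst h3; decide
  by_cases h4 : c = '4'
  · subst h4; decide
  by_cases h5 : c = '5'
  · subst h5; decide
  by_cases h6 : c = '6'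
  · subst h6; decide
  by_cases h7 : c = '7'
  · subst h7; decide
  by_cases h8 : c = '8'
  · subst h8; decide
  rw [pvFix7 c h0 h1 h2 h3 h4 h5 h6 h7, if_neg h8, pvFix8 c h0 h1 h2 h3 h4 h5 h6 h7 h8]

theorem pvStep9 (c : Char) :
    (if pvS8 c = '9' then '٩' else pvS8 c) = pvS9 c := by
  by_cases h0 : c = '0'
  · subst h0; decide
  by_cases h1 : c = '1'
  · subst h1; decide
  by_cases h2 : c = '2'
  · subst h2; decide
  by_cases h3 : c = '3'
  · subst h3; decide
  by_cases h4 : c = '4'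
  · subst h4; decide
  by_cases h5 : c = '5'
  · subst h5; decide
  by_cases h6 : c = '6'
  · subst h6; decide
  by_cases h7 : c = '7'
  · subst h7; decide
  by_cases h8 : c = '8'
  · subst h8; decide
  by_cases h9 : c = '9'
  · subst h9; decide
  rw [pvFix8 c h0 h1 h2 h3 h4 h5 h6 h7 h8, if_neg h9, pvFix9 c h0 h1 h2 h3 h4 h5 h6 h7 h8 h9]

theorem pvMap1 (l : List Char) :
    (l.map pvS0).map (fun c => if c = '1' then '١' else c) = l.map pvS1 := by
  rw [List.map_map]
  apply List.map_congr_left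
  intro c _
  simp only [Function.comp_apply]
  exact pvStep1 c

theorem pvMap2 (l : List Char) :
    (l.map pvS1).map (fun c => if c = '2' then '٢' else c) = l.map pvS2 := by
  rw [List.map_map]
  apply List.map_congr_left
  intro c _
  simp only [Function.comp_apply]
  exact pvStep2 c

theorem pvMap3 (l : List Char) :
    (l.map pvS2).map (fun c => if c = '3' then '٣' else c) = l.map pvS3 := by
  rw [List.map_map]
  apply List.map_congr_left
  intro c _
  simp only [Function.comp_apply]
  exact pvStep3 c

theorem pvMap4 (l : List Char) :
    (l.map pvS3).map (fun c => if c = '4' then '٤' else c) = l.map pvS4 := by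
  rw [List.map_map]
  apply List.map_congr_left
  intro c _
  simp only [Function.comp_apply]
  exact pvStep4 c

theorem pvMap5 (l : List Char) :
    (l.map pvS4).map (fun c => if c = '5' then '٥' else c) = l.map pvS5 := by
  rw [List.map_map]
  apply List.map_congr_left
  intro c _
  simp only [Function.comp_apply]
  exact pvStep5 c

theorem pvMap6 (l : List Char) :
    (l.map pvS5).map (fun c => if c = '6' then '٦' else c) = l.map pvS6 := by
  rw [List.map_map]
  apply List.map_congr_left
  intro c _
  simp only [Function.comp_apply]
  exact pvStep6 c

theorem pvMap7 (l : List Char) :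
    (l.map pvS6).map (fun c => if c = '7' then '٧' else c) = l.map pvS7 := by
  rw [List.map_map]
  apply List.map_congr_left
  intro c _
  simp only [Function.comp_apply]
  exact pvStep7 c

theorem pvMap8 (l : List Char) :
    (l.map pvS7).map (fun c => if c = '8' then '٨' else c) = l.map pvS8 := by
  rw [List.map_map]
  apply List.map_congr_left
  intro c _
  simp only [Function.comp_apply]
  exact pvStep8 c

theorem pvMap9 (l : List Char) :
    (l.map pvS8).map (fun c => if c = '9' then '٩' else c) = l.map pvS9 := by
  rw [List.map_map]
  apply List.map_congr_left
  intro c _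
  simp only [Function.comp_apply]
  exact pvStep9 c

theorem pvMaps (l : List Char) :
    (((((((((l.map (fun c => if c = '0' then '٠' else c)).map (fun c => if c = '1' then '١' else c)).map (fun c => if c = '2' then '٢' else c)).map (fun c => if c = '3' then '٣' else c)).map (fun c => if c = '4' then '٤' else c)).map (fun c => if c = '5' then '٥' else c)).map (fun c => if c = '6' then '٦' else c)).map (fun c => if c = '7' then '٧' else c)).map (fun c => if c = '8' then '٨' else c)).map (fun c => if c = '9' then '٩' else c) = l.map pvS9 := by
  rw [show l.map (fun c => if c = '0' then '٠' else c) = l.map pvS0 from rfl, pvMap1, pvMap2, pvMap3, pvMap4, pvMap5, pvMap6, pvMap7, pvMap8, pvMap9]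

theorem pvA_eq (text : String) :
    convert_english_to_arabic_digits text = String.ofList (text.toList.map pvS9) := by
  simp only [convert_english_to_arabic_digits, List.foldl]
  rw [show ("0":String) = String.ofList ['0'] from rfl, show ("٠":String) = String.ofList ['٠'] from rfl,
      show ("1":String) = String.ofList ['1'] from rfl, show ("١":String) = String.ofList ['١'] from rfl,
      show ("2":String) = String.ofList ['2'] from rfl, show ("٢":String) = String.ofList ['٢'] from rfl,
      show ("3":String) = String.ofList ['3'] from rfl, show ("٣":String) = String.ofList ['٣'] from rfl,
      show ("4":String) = String.ofList ['4'] from rfl, show ("٤":String) = String.ofList ['٤'] from rfl,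
      show ("5":String) = String.ofList ['5'] from rfl, show ("٥":String) = String.ofList ['٥'] from rfl,
      show ("6":String) = String.ofList ['6'] from rfl, show ("٦":String) = String.ofList ['٦'] from rfl,
      show ("7":String) = String.ofList ['7'] from rfl, show ("٧":String) = String.ofList ['٧'] from rfl,
      show ("8":String) = String.ofList ['8'] from rfl, show ("٨":String) = String.ofList ['٨'] from rfl,
      show ("9":String) = String.ofList ['9'] from rfl, show ("٩":String) = String.ofList ['٩'] from rfl]
  simp only [pvRep, String.toList_ofList]
  exact congrArg String.ofList (pvMaps text.toList)

-- B's per-character code-point shift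
def pvB (c : Char) : Char :=
  if 48 ≤ c.toNat ∧ c.toNat ≤ 57 then Char.ofNat (0x0660 + c.toNat - 48) else c

theorem pvBfold (l : List Char) (acc : List Char) :
    l.foldl (fun out c =>
      let o := c.toNat
      out ++ [if 48 ≤ o ∧ o ≤ 57 then Char.ofNat (0x0660 + o - 48) else c]) acc
      = acc ++ l.map pvB := by
  induction l generalizing acc with
  | nil => simp
  | cons c t ih => simp [List.foldl, ih, pvB]

-- the arithmetic shift agrees with the cumulative substitution of A's ten passes
theorem pvBS (c : Char) : pvB c = pvS9 c := by
  by_cases h0 : c = '0'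
  · subst h0; decide
  by_cases h1 : c = '1'
  · subst h1; decide
  by_cases h2 : c = '2'
  · subst h2; decide
  by_cases h3 : c = '3'
  · subst h3; decide
  by_cases h4 : c = '4'
  · subst h4; decide
  by_cases h5 : c = '5'
  · subst h5; decide
  by_cases h6 : c = '6'
  · subst h6; decide
  by_cases h7 : c = '7'
  · subst h7; decide
  by_cases h8 : c = '8'
  · subst h8; decide
  by_cases h9 : c = '9'
  · subst h9; decide
  rw [pvFix9 c h0 h1 h2 h3 h4 h5 h6 h7 h8 h9]
  have hofnat := Char.ofNat_toNat c
  have hrange : ¬(48 ≤ c.toNat ∧ c.toNat ≤ 57) := by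
    rintro ⟨hl, hr⟩
    have : c.toNat = 48 ∨ c.toNat = 49 ∨ c.toNat = 50 ∨ c.toNat = 51 ∨ c.toNat = 52 ∨
        c.toNat = 53 ∨ c.toNat = 54 ∨ c.toNat = 55 ∨ c.toNat = 56 ∨ c.toNat = 57 := by omega
    rcases this with h|h|h|h|h|h|h|h|h|h <;> rw [h] at hofnat
    · exact h0 (by rw [← hofnat])
    · exact h1 (by rw [← hofnat])
    · exact h2 (by rw [← hofnat])
    · exact h3 (by rw [← hofnat])
    · exact h4 (by rw [← hofnat])
    · exact h5 (by rw [← hofnat])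
    · exact h6 (by rw [← hofnat])
    · exact h7 (by rw [← hofnat])
    · exact h8 (by rw [← hofnat])
    · exact h9 (by rw [← hofnat])
  simp only [pvB, if_neg hrange]

theorem pvB_eq (text : String) :
    convert_english_to_arabic_digits_alt text = String.ofList (text.toList.map pvS9) := by
  simp only [convert_english_to_arabic_digits_alt]
  rw [pvBfold, List.nil_append]
  exact congrArg String.ofList (List.map_congr_left (fun c _ => pvBS c))

-- ===== VERDICT (by name: the statement is the Claim_ definition above) =====
theorem convert_english_to_arabic_digits_spec : Claim_equal_convert_english_to_arabic_digits := by
  intro text _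
  show _ = _
  rw [pvA_eq, pvB_eq]
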